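-- pv_equiv track=rewrite | github.com/gitcoder-pawan/practice-python | count_binstring.py | binarystring
-- ===== SOURCE A (Python) =====
-- def binarystring(string):
--     indexlist = []
--     for i in range(len(string)):
--         if string[i] == '1':
--             indexlist.append(i)
--     binstrlist = []
--     for i in range(len(indexlist)):
--         for j in range(i+1,len(indexlist)):
--             binstrlist.append( string[indexlist[i]:indexlist[j]+1])
--     return binstrlist
-- ===== SOURCE B (Python) =====
-- def binarystring(string):
--     # Direct nested scan over positions: no precomputed index table.
--     out = []
--     n = len(string)
--     for i in range(n):
--         if string[i] == '1':
--             for j in range(i + 1, n):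
--                 if string[j] == '1':
--                     out.append(string[i:j + 1])
--     return out
-- ===== Notes on version B (the rewrite author's own statement) =====
-- stated objective: alternative
-- what changed: A first builds a table of 1-positions and then pairs over table indices; B instead does a single direct nested scan over string positions guarded by character tests, producing the identical list in the identical order.
import Mathlib
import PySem

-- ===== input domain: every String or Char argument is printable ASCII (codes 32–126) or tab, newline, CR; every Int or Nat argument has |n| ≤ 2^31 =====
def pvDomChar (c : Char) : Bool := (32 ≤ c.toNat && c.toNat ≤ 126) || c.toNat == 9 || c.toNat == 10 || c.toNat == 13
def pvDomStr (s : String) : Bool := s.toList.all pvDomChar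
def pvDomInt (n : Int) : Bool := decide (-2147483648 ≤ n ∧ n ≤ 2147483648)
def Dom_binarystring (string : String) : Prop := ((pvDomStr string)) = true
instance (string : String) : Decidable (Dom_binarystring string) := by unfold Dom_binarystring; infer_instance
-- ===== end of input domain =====

-- B replaces A's precomputed table of '1'-positions with a direct nested scan over positions; same output, same order.

-- ===== PORT A =====
def binarystring (string : String) : List String :=
  let indexlist : List Int :=
    (PySem.List.pyRange 0 (PySem.Str.len string) 1).foldl
      (fun acc i => if PySem.Str.pyGet? string i == some '1' then acc ++ [i] else acc) []
  let binstrlist : List String :=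
    (PySem.List.pyRange 0 (indexlist.length : Int) 1).foldl
      (fun acc i =>
        (PySem.List.pyRange (i + 1) (indexlist.length : Int) 1).foldl
          (fun acc j =>
            acc ++ [PySem.Str.slice string (some (PySem.List.pyGetD indexlist i 0))
                      (some (PySem.List.pyGetD indexlist j 0 + 1))]) acc) []
  binstrlist

-- ===== PORT B =====
def binarystring_alt (string : String) : List String :=
  let n : Int := PySem.Str.len string
  (PySem.List.pyRange 0 n 1).foldl
    (fun acc i =>
      if PySem.Str.pyGet? string i == some '1' then
        (PySem.List.pyRange (i + 1) n 1).foldl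
          (fun acc j =>
            if PySem.Str.pyGet? string j == some '1' then
              acc ++ [PySem.Str.slice string (some i) (some (j + 1))]
            else acc) acc
      else acc) []

-- ===== PRECONDITION & SPEC =====
def Spec_binarystring (string : String) (out : List String) : Prop := out = binarystring_alt string
instance (string : String) (out : List String) : Decidable (Spec_binarystring string out) := by unfold Spec_binarystring; infer_instance

-- ===== CLAIM (what is proved, stated in full; the proofs are below) =====
def Claim_equal_binarystring : Prop := ∀ (string : String), Dom_binarystring string → Spec_binarystring string (binarystring string)

-- ===== LEMMAS AND PROOFS =====

-- all ordered pairs (a strictly before b) of a list, mapped through f, in A's emission order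
def pvPairs {α β : Type} (f : α → α → β) : List α → List β
  | [] => []
  | a :: t => t.map (f a) ++ pvPairs f t

-- the slice string[a:b+1] both programs emit for a pair of '1'-positions a < b
def pvSl (string : String) (a b : Int) : String := PySem.Str.slice string (some a) (some (b + 1))

-- the positions of '1' in the string, in increasing order
def pvIdx (string : String) : List Int :=
  (PySem.List.pyRange 0 (PySem.Str.len string) 1).filter
    (fun i => PySem.Str.pyGet? string i == some '1')

theorem pv_flatMap_congr_mem {α β : Type} (l : List α) (g h : α → List β)
    (hg : ∀ x ∈ l, g x = h x) : l.flatMap g = l.flatMap h := by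
  induction l with
  | nil => simp
  | cons a t ih =>
    simp only [List.flatMap_cons]
    rw [hg a (by simp), ih (fun x hx => hg x (by simp [hx]))]

theorem pv_map_range_getD {α : Type} (d : α) :
    ∀ (ys : List α) (s : Nat),
      (List.range (ys.length - s)).map (fun j => ys.getD (s + j) d) = ys.drop s := by
  intro ys
  induction ys with
  | nil => intro s; simp
  | cons a t ih =>
    intro s
    cases s with
    | zero =>
      simp only [List.length_cons, Nat.sub_zero, List.drop_zero]
      rw [List.range_succ_eq_map]
      simp only [List.map_cons, List.map_map, Nat.zero_add, List.getD_cons_zero]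
      congr 1
      have h1 : (List.range t.length).map ((fun j => (a :: t).getD j d) ∘ Nat.succ)
          = (List.range t.length).map (fun j => t.getD j d) := by
        apply List.map_congr_left; intro x _; simp [Function.comp]
      rw [h1]
      have := ih 0
      simpa using this
    | succ s' =>
      simp only [List.length_cons, Nat.succ_sub_succ, List.drop_succ_cons]
      have h1 : (List.range (t.length - s')).map (fun j => (a :: t).getD (s' + 1 + j) d)
          = (List.range (t.length - s')).map (fun j => t.getD (s' + j) d) := by
        apply List.map_congr_left; intro x _
        have hx : s' + 1 + x = (s' + x) + 1 := by omega
        rw [hx]; simp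
      rw [h1, ih s']

theorem pv_flatMap_range_drop {α β : Type} (f : α → α → β) (d : α) :
    ∀ (ys : List α),
      (List.range ys.length).flatMap (fun k => (ys.drop (k + 1)).map (f (ys.getD k d))) = pvPairs f ys := by
  intro ys
  induction ys with
  | nil => simp [pvPairs]
  | cons a t ih =>
    simp only [List.length_cons, pvPairs]
    rw [List.range_succ_eq_map]
    simp only [List.flatMap_cons, List.flatMap_map]
    have h1 : (List.range t.length).flatMap (fun k => ((a :: t).drop (k.succ + 1)).map (f ((a :: t).getD k.succ d)))
        = (List.range t.length).flatMap fun k => (t.drop (k + 1)).map (f (t.getD k d)) := by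
      apply pv_flatMap_congr_mem; intro k _
      simp [Nat.succ_eq_add_one]
    rw [h1, ih]
    simp

theorem pv_flatMap_ite {α β : Type} (p : α → Bool) (g : α → List β) :
    ∀ (l : List α), (l.flatMap fun i => if p i then g i else []) = (l.filter p).flatMap g := by
  intro l
  induction l with
  | nil => simp
  | cons a t ih =>
    by_cases h : p a = true
    · simp [h, ih]
    · simp only [Bool.not_eq_true] at h
      simp [h, ih]

theorem pv_pairs_sorted {β : Type} (f : Int → Int → β) :
    ∀ (ys : List Int), ys.Pairwise (· < ·) →
      (ys.flatMap fun x => (ys.filter fun b => decide (x < b)).map (f x)) = pvPairs f ys := by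
  intro ys
  induction ys with
  | nil => intro _; simp [pvPairs]
  | cons a t ih =>
    intro hp
    rw [List.pairwise_cons] at hp
    obtain ⟨ha, ht⟩ := hp
    simp only [List.flatMap_cons, pvPairs]
    congr 1
    · rw [List.filter_cons]
      simp only [decide_eq_true_eq, lt_self_iff_false, if_false]
      rw [List.filter_eq_self.mpr (fun b hb => by simpa using ha b hb)]
    · have h1 : (t.flatMap fun x => ((a :: t).filter fun b => decide (x < b)).map (f x))
          = t.flatMap fun x => (t.filter fun b => decide (x < b)).map (f x) := by
        apply pv_flatMap_congr_mem
        intro x hx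
        rw [List.filter_cons]
        have : ¬ x < a := not_lt.mpr (le_of_lt (ha x hx))
        simp [this]
      rw [h1, ih ht]

-- the suffix of a strictly increasing Int range, as a filter of the whole range
theorem pv_range_filter_gt (n i : Int) (h0 : 0 ≤ i) (hn : i < n) :
    ((PySem.List.pyRange 0 n 1).filter fun b => decide (i < b)) = PySem.List.pyRange (i + 1) n 1 := by
  rw [PySem.List.pyRange_one_append 0 (i + 1) n (by omega) (by omega), List.filter_append]
  have h1 : ((PySem.List.pyRange 0 (i + 1) 1).filter fun b => decide (i < b)) = [] := by
    apply List.filter_eq_nil_iff.mpr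
    intro b hb
    rw [PySem.List.mem_pyRange_one] at hb
    simp; omega
  have h2 : ((PySem.List.pyRange (i + 1) n 1).filter fun b => decide (i < b)) = PySem.List.pyRange (i + 1) n 1 := by
    apply List.filter_eq_self.mpr
    intro b hb
    rw [PySem.List.mem_pyRange_one] at hb
    simp; omega
  rw [h1, h2, List.nil_append]

-- A's table-then-pair computation emits exactly the ordered pairs of the '1'-position list
theorem pv_A_eq (string : String) :
    binarystring string = pvPairs (pvSl string) (pvIdx string) := by
  unfold binarystring
  dsimp only
  rw [PySem.List.foldl_append_if_eq_filter (fun i => PySem.Str.pyGet? string i == some '1')]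
  rw [List.nil_append]
  have hid : (PySem.List.pyRange 0 (PySem.Str.len string) 1).filter
      (fun i => PySem.Str.pyGet? string i == some '1') = pvIdx string := rfl
  rw [hid]
  have h1 : (fun (acc : List String) (i : Int) =>
        (PySem.List.pyRange (i + 1) ((pvIdx string).length : Int) 1).foldl
          (fun acc j =>
            acc ++ [PySem.Str.slice string (some (PySem.List.pyGetD (pvIdx string) i 0))
                      (some (PySem.List.pyGetD (pvIdx string) j 0 + 1))]) acc)
      = fun acc i => acc ++ (PySem.List.pyRange (i + 1) ((pvIdx string).length : Int) 1).map
          (fun j => PySem.Str.slice string (some (PySem.List.pyGetD (pvIdx string) i 0))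
                      (some (PySem.List.pyGetD (pvIdx string) j 0 + 1))) := by
    funext acc i
    rw [PySem.List.foldl_append_singleton_eq_map]
  rw [h1, PySem.List.foldl_append_eq_flatMap, List.nil_append]
  rw [PySem.List.pyRange_zero_nat (pvIdx string).length, List.flatMap_map]
  have h2 : ((List.range (pvIdx string).length).flatMap fun (k : Nat) =>
        (PySem.List.pyRange ((k : Int) + 1) ((pvIdx string).length : Int) 1).map
          (fun j => PySem.Str.slice string (some (PySem.List.pyGetD (pvIdx string) (k : Int) 0))
                      (some (PySem.List.pyGetD (pvIdx string) j 0 + 1))))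
      = (List.range (pvIdx string).length).flatMap fun k =>
          ((pvIdx string).drop (k + 1)).map (pvSl string ((pvIdx string).getD k 0)) := by
    apply pv_flatMap_congr_mem
    intro k hk
    rw [List.mem_range] at hk
    rw [PySem.List.pyRange_one]
    have hlen : (((pvIdx string).length : Int) - ((k : Int) + 1)).toNat = (pvIdx string).length - (k + 1) := by omega
    rw [hlen, List.map_map]
    have h3 : ((fun j => PySem.Str.slice string (some (PySem.List.pyGetD (pvIdx string) (k : Int) 0))
                  (some (PySem.List.pyGetD (pvIdx string) j 0 + 1))) ∘ (fun (j : Nat) => (k : Int) + 1 + (j : Int)))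
        = fun (j : Nat) => pvSl string ((pvIdx string).getD k 0) ((pvIdx string).getD ((k + 1) + j) 0) := by
      funext j
      have hc : (k : Int) + 1 + (j : Int) = (((k + 1) + j : Nat) : Int) := by push_cast; ring
      simp only [Function.comp, hc, PySem.List.pyGetD_natCast, pvSl]
    rw [h3]
    have h4 : (List.range ((pvIdx string).length - (k + 1))).map
          (fun (j : Nat) => pvSl string ((pvIdx string).getD k 0) ((pvIdx string).getD ((k + 1) + j) 0))
        = ((List.range ((pvIdx string).length - (k + 1))).map
            (fun (j : Nat) => (pvIdx string).getD ((k + 1) + j) 0)).map (pvSl string ((pvIdx string).getD k 0)) := by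
      rw [List.map_map]; rfl
    rw [h4, pv_map_range_getD 0 (pvIdx string) (k + 1)]
  rw [h2, pv_flatMap_range_drop]

-- B's guarded nested scan emits exactly the ordered pairs of the '1'-position list
theorem pv_B_eq (string : String) :
    binarystring_alt string = pvPairs (pvSl string) (pvIdx string) := by
  unfold binarystring_alt
  dsimp only
  have h1 : (fun (acc : List String) (i : Int) =>
      if PySem.Str.pyGet? string i == some '1' then
        (PySem.List.pyRange (i + 1) (PySem.Str.len string) 1).foldl
          (fun acc j => if PySem.Str.pyGet? string j == some '1' then
              acc ++ [PySem.Str.slice string (some i) (some (j + 1))] else acc) acc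
      else acc)
      = fun acc i => acc ++ (if PySem.Str.pyGet? string i == some '1' then
          ((PySem.List.pyRange (i + 1) (PySem.Str.len string) 1).filter
            (fun j => PySem.Str.pyGet? string j == some '1')).map
            (fun j => PySem.Str.slice string (some i) (some (j + 1))) else []) := by
    funext acc i
    by_cases h : (PySem.Str.pyGet? string i == some '1') = true
    · simp only [h, if_true]
      rw [PySem.List.foldl_append_if (fun j => PySem.Str.pyGet? string j == some '1')
        (fun j => PySem.Str.slice string (some i) (some (j + 1)))]
    · rw [if_neg h, if_neg h, List.append_nil]
  rw [h1, PySem.List.foldl_append_eq_flatMap, List.nil_append]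
  rw [pv_flatMap_ite]
  have hid : (PySem.List.pyRange 0 (PySem.Str.len string) 1).filter
      (fun i => PySem.Str.pyGet? string i == some '1') = pvIdx string := rfl
  rw [hid]
  have h2 : ((pvIdx string).flatMap fun i =>
        ((PySem.List.pyRange (i + 1) (PySem.Str.len string) 1).filter
          (fun j => PySem.Str.pyGet? string j == some '1')).map
          (fun j => PySem.Str.slice string (some i) (some (j + 1))))
      = (pvIdx string).flatMap fun i =>
          ((pvIdx string).filter fun b => decide (i < b)).map (pvSl string i) := by
    apply pv_flatMap_congr_mem
    intro i hi
    have hmem : i ∈ PySem.List.pyRange 0 (PySem.Str.len string) 1 := List.mem_of_mem_filter hi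
    rw [PySem.List.mem_pyRange_one] at hmem
    have hfg : ((pvIdx string).filter fun b => decide (i < b))
        = (PySem.List.pyRange (i + 1) (PySem.Str.len string) 1).filter
            (fun j => PySem.Str.pyGet? string j == some '1') := by
      show (((PySem.List.pyRange 0 (PySem.Str.len string) 1).filter
          (fun j => PySem.Str.pyGet? string j == some '1')).filter fun b => decide (i < b)) = _
      rw [List.filter_comm, pv_range_filter_gt (PySem.Str.len string) i hmem.1 hmem.2]
    rw [hfg]
    rfl
  rw [h2]
  exact pv_pairs_sorted (pvSl string) (pvIdx string)
    ((PySem.List.pairwise_lt_pyRange_one 0 (PySem.Str.len string)).filter _)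

-- ===== VERDICT (by name: the statement is the Claim_ definition above) =====
theorem binarystring_spec : Claim_equal_binarystring := by
  intro string _
  unfold Spec_binarystring
  rw [pv_A_eq, pv_B_eq]
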